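-- pv_equiv track=rewrite | github.com/HaloKim/self_study | 1d1c/프로그래머스/# 더 맵게.py | solution
-- ===== SOURCE A (Python) =====
-- import heapq
--
-- def solution(scoville, K):
--     heap = []
--     cnt = 0
--     for i in scoville:
--         heapq.heappush(heap, i)
--     while True:
--         if heap[0] < K and len(heap) >= 2:
--             a,b = heapq.heappop(heap), heapq.heappop(heap)
--             heapq.heappush(heap, a+(b*2))
--             cnt += 1
--         elif heap[0] < K and len(heap) == 1:
--             return -1
--         else:
--             return cnt
-- ===== SOURCE B (Python) =====
-- def solution(scoville, K):
--     s = sorted(scoville)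
--     cnt = 0
--     while s[0] < K:
--         if len(s) == 1:
--             return -1
--         a = s.pop(0)
--         b = s.pop(0)
--         x = a + b * 2
--         i = 0
--         while i < len(s) and s[i] <= x:
--             i += 1
--         s.insert(i, x)
--         cnt += 1
--     return cnt
-- ===== Notes on version B (the rewrite author's own statement) =====
-- stated objective: alternative
-- what changed: Replaces the binary heap by a once-sorted list kept sorted: the two smallest foods are simply the first two elements, and the mixed value is re-inserted at its ordered position by an insertion scan, so no heap sift operations remain.
import Mathlib
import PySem

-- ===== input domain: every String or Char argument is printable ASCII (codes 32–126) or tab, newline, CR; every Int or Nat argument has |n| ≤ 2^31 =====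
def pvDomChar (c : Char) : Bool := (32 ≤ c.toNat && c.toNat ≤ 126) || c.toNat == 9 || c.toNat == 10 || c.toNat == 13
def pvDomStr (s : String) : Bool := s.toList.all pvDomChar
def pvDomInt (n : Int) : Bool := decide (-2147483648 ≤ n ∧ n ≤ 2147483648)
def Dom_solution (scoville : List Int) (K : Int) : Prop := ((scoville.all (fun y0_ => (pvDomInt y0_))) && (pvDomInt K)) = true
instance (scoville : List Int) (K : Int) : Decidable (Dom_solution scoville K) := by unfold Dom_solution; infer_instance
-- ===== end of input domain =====

-- B replaces A's heapq priority queue by a once-sorted list maintained by an insertion scan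
-- (alternative data structure, not claimed faster); equivalence is about the return value.

-- ===== PORT A =====
-- heapq is modeled by its contract on Int elements, which determines every value A observes:
-- heappush adds the item, heappop removes and returns the minimum, heap[0] is the minimum
-- (ties are equal Ints, hence indistinguishable). This is exact for A's uses of the library.
def heappush (heap : List Int) (item : Int) : List Int := heap ++ [item]

def heapTop (heap : List Int) : Int := (PySem.List.min? heap (fun x => x)).getD 0
-- the .getD 0 default is unreachable: heapTop is only consulted on a nonempty heap

def heappop (heap : List Int) : Int × List Int :=
  let m := heapTop heap
  (m, heap.erase m)

theorem heapTop_mem (h : List Int) (hne : h ≠ []) : heapTop h ∈ h := by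
  cases hm : PySem.List.min? h (fun x => x) with
  | none => exact absurd ((PySem.List.min?_eq_none_iff h _).mp hm) hne
  | some m => simpa [heapTop, hm] using PySem.List.min?_mem hm

-- A's 'while True' loop; the first branch shrinks the heap by one, so we recurse on length
def solutionLoop (K : Int) (heap : List Int) (cnt : Int) : Int :=
  if hne : heap = [] then -1  -- Python raises IndexError on heap[0] here; excluded by Pre_solution
  else if heapTop heap < K ∧ 2 ≤ heap.length then
    let p1 := heappop heap
    let p2 := heappop p1.2
    solutionLoop K (heappush p2.2 (p1.1 + p2.1 * 2)) (cnt + 1)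
  else if heapTop heap < K then -1
  else cnt
termination_by heap.length
decreasing_by
  have h1 : heapTop heap ∈ heap := heapTop_mem _ hne
  have e1 := List.length_erase_of_mem h1
  have hne2 : heap.erase (heapTop heap) ≠ [] := by
    intro e
    rw [e] at e1
    simp at e1
    omega
  have h2 : heapTop (heap.erase (heapTop heap)) ∈ heap.erase (heapTop heap) :=
    heapTop_mem _ hne2
  have e2 := List.length_erase_of_mem h2
  simp only [heappush, heappop, List.length_append, List.length_cons, List.length_nil]
  omega

def solution (scoville : List Int) (K : Int) : Int :=
  let heap := scoville.foldl heappush []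
  solutionLoop K heap 0

-- ===== PORT B =====
-- Source B's inner insertion loop: walk past the elements ≤ x, insert x before the first greater one
def insertScan (s : List Int) (x : Int) : List Int :=
  match s with
  | [] => [x]
  | y :: ys => if y ≤ x then y :: insertScan ys x else x :: y :: ys

theorem length_insertScan (x : Int) (s : List Int) :
    (insertScan s x).length = s.length + 1 := by
  induction s with
  | nil => rfl
  | cons y ys ih => by_cases h : y ≤ x <;> simp [insertScan, h, ih]

-- Source B's outer while loop over the sorted list
def solutionAltLoop (K : Int) (s : List Int) (cnt : Int) : Int :=
  match s with
  | [] => -1  -- Python raises IndexError on s[0] here; excluded by Pre_solution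
  | a :: rest =>
    if a < K then
      match rest with
      | [] => -1
      | b :: rest2 => solutionAltLoop K (insertScan rest2 (a + b * 2)) (cnt + 1)
    else cnt
termination_by s.length
decreasing_by simp [length_insertScan]

def solution_alt (scoville : List Int) (K : Int) : Int :=
  solutionAltLoop K (PySem.List.sorted scoville (fun x => x) false) 0

-- ===== PRECONDITION & SPEC =====
-- Pre_ excludes only the empty list, on which both A and B raise IndexError (heap[0] / s[0]).
def Pre_solution (scoville : List Int) (_K : Int) : Prop := scoville ≠ []
instance (scoville : List Int) (K : Int) : Decidable (Pre_solution scoville K) := by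
  unfold Pre_solution; infer_instance

def pvWitness_solution : List Int × Int := ([1, 2, 3, 9, 10, 12], 7)

def Spec_solution (scoville : List Int) (K : Int) (out : Int) : Prop := out = solution_alt scoville K
instance (scoville : List Int) (K : Int) (out : Int) : Decidable (Spec_solution scoville K out) := by unfold Spec_solution; infer_instance

-- ===== CLAIM (what is proved, stated in full; the proofs are below) =====
def Claim_equal_solution : Prop := ∀ (scoville : List Int) (K : Int), Dom_solution scoville K → Pre_solution scoville K → Spec_solution scoville K (solution scoville K)

-- ===== LEMMAS AND PROOFS =====

theorem mem_insertScan {z x : Int} {s : List Int} :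
    z ∈ insertScan s x ↔ z = x ∨ z ∈ s := by
  induction s with
  | nil => simp [insertScan]
  | cons y ys ih =>
    by_cases h : y ≤ x
    · simp [insertScan, h, ih]; tauto
    · simp [insertScan, h]

theorem pairwise_insertScan (x : Int) (s : List Int) (hs : s.Pairwise (· ≤ ·)) :
    (insertScan s x).Pairwise (· ≤ ·) := by
  induction s with
  | nil => simp [insertScan]
  | cons y ys ih =>
    rw [List.pairwise_cons] at hs
    by_cases h : y ≤ x
    · rw [insertScan, if_pos h, List.pairwise_cons]
      refine ⟨fun z hz => ?_, ih hs.2⟩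
      rcases mem_insertScan.mp hz with rfl | hz
      · exact h
      · exact hs.1 z hz
    · rw [insertScan, if_neg h, List.pairwise_cons]
      refine ⟨fun z hz => ?_, List.pairwise_cons.mpr hs⟩
      rcases List.mem_cons.mp hz with rfl | hz
      · omega
      · have := hs.1 z hz; omega

theorem perm_insertScan (x : Int) (s : List Int) :
    (insertScan s x).Perm (x :: s) := by
  induction s with
  | nil => simp [insertScan]
  | cons y ys ih =>
    by_cases h : y ≤ x
    · rw [insertScan, if_pos h]
      exact ((ih.cons y).trans (List.Perm.swap x y ys))
    · rw [insertScan, if_neg h]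

-- the top of a heap permutation-equal to a sorted list a :: rest is a
theorem heapTop_of_perm_sorted {heap : List Int} {a : Int} {rest : List Int}
    (hp : heap.Perm (a :: rest)) (hs : (a :: rest).Pairwise (· ≤ ·)) :
    heapTop heap = a := by
  have hne : heap ≠ [] := by
    intro e; rw [e] at hp; have := List.nil_perm.mp hp; simp at this
  cases hm : PySem.List.min? heap (fun x => x) with
  | none => exact absurd ((PySem.List.min?_eq_none_iff heap _).mp hm) hne
  | some m =>
    have hmem : m ∈ heap := PySem.List.min?_mem hm
    have hmin := PySem.List.min?_isMin hm
    have hma : m ≤ a := hmin a (hp.symm.mem_iff.mp (by simp))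
    have ham : a ≤ m := by
      rcases List.mem_cons.mp (hp.mem_iff.mp hmem) with rfl | hmr
      · exact le_refl _
      · exact (List.pairwise_cons.mp hs).1 m hmr
    simp [heapTop, hm]
    omega

-- core loop equivalence: A's heap loop equals B's sorted-list loop on any permutation-equal,
-- sorted list
theorem loop_eq (K : Int) : ∀ (n : Nat) (heap s : List Int) (cnt : Int),
    heap.length = n → heap.Perm s → s.Pairwise (· ≤ ·) →
    solutionLoop K heap cnt = solutionAltLoop K s cnt := by
  intro n
  induction n using Nat.strong_induction_on with
  | _ n ih =>
    intro heap s cnt hlen hp hs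
    cases s with
    | nil =>
      have : heap = [] := List.perm_nil.mp hp
      rw [this, solutionLoop, solutionAltLoop]
      simp
    | cons a rest =>
      have hne : heap ≠ [] := by
        intro e; rw [e] at hp; have := List.nil_perm.mp hp; simp at this
      have htop : heapTop heap = a := heapTop_of_perm_sorted hp hs
      have hlens : heap.length = rest.length + 1 := by
        rw [hp.length_eq]; simp
      by_cases hK : a < K
      · cases rest with
        | nil =>
          -- single element below K: both return -1
          rw [solutionLoop, dif_neg hne, solutionAltLoop]
          have h1 : heap.length = 1 := by simpa using hlens
          rw [if_neg (by rw [htop, h1]; omega), if_pos (by rw [htop]; exact hK)]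
          simp [hK]
        | cons b rest2 =>
          -- merge step on both sides
          have hge2 : 2 ≤ heap.length := by
            simp only [hlens, List.length_cons]; omega
          have hs' : (b :: rest2).Pairwise (· ≤ ·) := (List.pairwise_cons.mp hs).2
          have htop2 : heapTop (heap.erase a) = b := by
            refine heapTop_of_perm_sorted ?_ hs'
            have := hp.erase a
            simpa using this
          rw [solutionLoop, dif_neg hne,
              if_pos ⟨by rw [htop]; exact hK, hge2⟩, solutionAltLoop]
          simp only [heappop, htop]
          rw [htop2]
          have hpush : (heappush ((heap.erase a).erase b) (a + b * 2)).Perm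
              (insertScan rest2 (a + b * 2)) := by
            refine List.Perm.trans ?_ (perm_insertScan _ _).symm
            refine List.Perm.trans (List.perm_append_singleton _ _) ?_
            refine List.Perm.cons _ ?_
            have h1 := hp.erase a
            simp only [List.erase_cons_head] at h1
            have h2 := h1.erase b
            simpa using h2
          have hlen2 : (heappush ((heap.erase a).erase b) (a + b * 2)).length = n - 1 := by
            have h1 : a ∈ heap := by rw [← htop]; exact heapTop_mem _ hne
            have e1 := List.length_erase_of_mem h1
            have h2 : b ∈ heap.erase a := by
              rw [← htop2]
              refine heapTop_mem _ ?_
              intro e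
              rw [e] at e1
              simp at e1
              omega
            have e2 := List.length_erase_of_mem h2
            simp only [heappush, List.length_append, List.length_cons, List.length_nil]
            omega
          rw [if_pos hK]
          exact ih (n - 1) (by omega) _ _ _ hlen2 hpush
            (pairwise_insertScan _ _ (List.pairwise_cons.mp hs').2)
      · -- smallest already ≥ K: both return cnt
        rw [solutionLoop, dif_neg hne, if_neg (by rw [htop]; tauto),
            if_neg (by rw [htop]; exact hK), solutionAltLoop.eq_def]
        simp [hK]

theorem foldl_heappush (l acc : List Int) : l.foldl heappush acc = acc ++ l := by
  induction l generalizing acc with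
  | nil => simp
  | cons x xs ih => simp [List.foldl_cons, heappush, ih]

-- ===== VERDICT (by name: the statement is the Claim_ definition above) =====
theorem solution_spec : Claim_equal_solution := by
  intro scoville K _ _
  unfold Spec_solution solution solution_alt
  refine loop_eq K scoville.length _ _ 0 ?_ ?_ ?_
  · simp [foldl_heappush]
  · rw [foldl_heappush]
    simpa using (PySem.List.sorted_perm scoville (fun x => x) false).symm
  · exact PySem.List.sorted_pairwise scoville (fun x => x)
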